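-- pv_equiv track=rewrite | github.com/greenish0902/Algorithm | LeetCode-python3/401_binary_watch.py | getCombination
-- ===== SOURCE A (Python) =====
-- def getCombination(num: int, keyword: str):
--   hourList = []
--   minList = []
--   if (keyword == "h"):
--     if (num < 4):
--       for a in range(2):
--         for b in range(2):
--           for c in range(2):
--             for d in range(2):
--               if (a + b + c + d) == num:
--                 sum = a * 8 + b * 4 + c * 2 + d
--                 if sum < 12:
--                   hourList.append(str(sum))
--     return hourList
--   elif (keyword == "m"):
--     if (num < 6):
--       for a in range(2):
--         for b in range(2):
--           for c in range(2):
--             for d in range(2):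
--               for e in range(2):
--                 for f in range(2):
--                   if (a + b + c + d + e + f) == num:
--                     sum = a * 32 + b * 16 + c * 8 + d * 4 + e * 2 + f
--                     if sum < 60:
--                       minList.append(str(sum))
--     return minList
-- ===== SOURCE B (Python) =====
-- def getCombination(num: int, keyword: str):
--     if keyword == "h":
--         return [str(x) for x in range(12) if bin(x).count("1") == num]
--     elif keyword == "m":
--         return [str(x) for x in range(60) if bin(x).count("1") == num]
-- ===== Notes on version B (the rewrite author's own statement) =====
-- stated objective: simpler
-- what changed: Replaced the 4-/6-deep nested bit-construction loops with a single scan over range(12)/range(60) keeping values whose popcount equals num.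
import Mathlib
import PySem

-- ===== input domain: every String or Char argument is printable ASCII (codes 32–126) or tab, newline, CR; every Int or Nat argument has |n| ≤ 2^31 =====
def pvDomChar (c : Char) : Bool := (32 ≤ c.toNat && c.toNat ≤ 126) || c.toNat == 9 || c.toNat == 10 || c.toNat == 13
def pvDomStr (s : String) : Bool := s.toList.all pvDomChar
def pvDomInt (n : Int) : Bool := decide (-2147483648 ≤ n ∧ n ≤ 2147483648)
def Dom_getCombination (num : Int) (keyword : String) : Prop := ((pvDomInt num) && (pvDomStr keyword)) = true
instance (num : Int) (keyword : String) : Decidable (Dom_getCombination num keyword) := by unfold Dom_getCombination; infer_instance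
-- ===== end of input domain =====

-- B replaces A's nested per-bit construction loops by one scan of the value range keeping
-- values whose popcount equals num (objective: simpler).

-- ===== PORT A =====
def getCombination (num : Int) (keyword : String) : Option (List String) :=
  let hourList : List String := []
  let minList : List String := []
  if keyword == "h" then
    some (if num < 4 then
      (PySem.List.pyRange 0 2 1).foldl (fun acc a =>
        (PySem.List.pyRange 0 2 1).foldl (fun acc b =>
          (PySem.List.pyRange 0 2 1).foldl (fun acc c =>
            (PySem.List.pyRange 0 2 1).foldl (fun acc d =>
              if a + b + c + d = num then
                let s := a * 8 + b * 4 + c * 2 + d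
                if s < 12 then acc ++ [PySem.Int.toStr s] else acc
              else acc) acc) acc) acc) hourList
    else hourList)
  else if keyword == "m" then
    some (if num < 6 then
      (PySem.List.pyRange 0 2 1).foldl (fun acc a =>
        (PySem.List.pyRange 0 2 1).foldl (fun acc b =>
          (PySem.List.pyRange 0 2 1).foldl (fun acc c =>
            (PySem.List.pyRange 0 2 1).foldl (fun acc d =>
              (PySem.List.pyRange 0 2 1).foldl (fun acc e =>
                (PySem.List.pyRange 0 2 1).foldl (fun acc f =>
                  if a + b + c + d + e + f = num then
                    let s := a * 32 + b * 16 + c * 8 + d * 4 + e * 2 + f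
                    if s < 60 then acc ++ [PySem.Int.toStr s] else acc
                  else acc) acc) acc) acc) acc) acc) minList
    else minList)
  else none

-- ===== PORT B =====
-- 'bin(x).count("1")' for x ≥ 0 (all x drawn from range(...)) is exactly PySem.Int.bitCount x
def getCombination_alt (num : Int) (keyword : String) : Option (List String) :=
  if keyword == "h" then
    some (((PySem.List.pyRange 0 12 1).filter
      (fun x => (PySem.Int.bitCount x : Int) == num)).map PySem.Int.toStr)
  else if keyword == "m" then
    some (((PySem.List.pyRange 0 60 1).filter
      (fun x => (PySem.Int.bitCount x : Int) == num)).map PySem.Int.toStr)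
  else none

-- ===== PRECONDITION & SPEC =====
def Spec_getCombination (num : Int) (keyword : String) (out : Option (List String)) : Prop := out = getCombination_alt num keyword
instance (num : Int) (keyword : String) (out : Option (List String)) : Decidable (Spec_getCombination num keyword out) := by unfold Spec_getCombination; infer_instance

-- ===== CLAIM (what is proved, stated in full; the proofs are below) =====
def Claim_equal_getCombination : Prop := ∀ (num : Int) (keyword : String), Dom_getCombination num keyword → Spec_getCombination num keyword (getCombination num keyword)

-- ===== LEMMAS AND PROOFS =====

-- a fold whose step leaves the accumulator unchanged on every list element is the identity
theorem pvFoldlId {α : Type} (l : List α) (F : List String → α → List String)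
    (h : ∀ acc x, x ∈ l → F acc x = acc) (acc : List String) : l.foldl F acc = acc := by
  induction l generalizing acc with
  | nil => rfl
  | cons y t ih =>
      simp only [List.foldl, h acc y (by simp)]
      exact ih (fun acc x hx => h acc x (by simp [hx])) acc

theorem pvMem01 {x : Int} (h : x ∈ ([0, 1] : List Int)) : 0 ≤ x := by
  simp only [List.mem_cons, List.not_mem_nil, or_false] at h
  rcases h with h | h <;> omega

-- A's hour loop appends nothing when num is negative (every bit sum is ≥ 0)
theorem pvHourLoopEmpty (num : Int) (h : num < 0) :
    (PySem.List.pyRange 0 2 1).foldl (fun acc a =>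
        (PySem.List.pyRange 0 2 1).foldl (fun acc b =>
          (PySem.List.pyRange 0 2 1).foldl (fun acc c =>
            (PySem.List.pyRange 0 2 1).foldl (fun acc d =>
              if a + b + c + d = num then
                let s := a * 8 + b * 4 + c * 2 + d
                if s < 12 then acc ++ [PySem.Int.toStr s] else acc
              else acc) acc) acc) acc) ([] : List String) = [] := by
  have hr : PySem.List.pyRange 0 2 1 = [0, 1] := by decide
  rw [hr]
  apply pvFoldlId; intro acc a ha
  apply pvFoldlId; intro acc b hb
  apply pvFoldlId; intro acc c hc
  apply pvFoldlId; intro acc d hd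
  rw [if_neg]
  have := pvMem01 ha; have := pvMem01 hb; have := pvMem01 hc; have := pvMem01 hd
  omega

-- A's minute loop appends nothing when num is negative
theorem pvMinLoopEmpty (num : Int) (h : num < 0) :
    (PySem.List.pyRange 0 2 1).foldl (fun acc a =>
        (PySem.List.pyRange 0 2 1).foldl (fun acc b =>
          (PySem.List.pyRange 0 2 1).foldl (fun acc c =>
            (PySem.List.pyRange 0 2 1).foldl (fun acc d =>
              (PySem.List.pyRange 0 2 1).foldl (fun acc e =>
                (PySem.List.pyRange 0 2 1).foldl (fun acc f =>
                  if a + b + c + d + e + f = num then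
                    let s := a * 32 + b * 16 + c * 8 + d * 4 + e * 2 + f
                    if s < 60 then acc ++ [PySem.Int.toStr s] else acc
                  else acc) acc) acc) acc) acc) acc) ([] : List String) = [] := by
  have hr : PySem.List.pyRange 0 2 1 = [0, 1] := by decide
  rw [hr]
  apply pvFoldlId; intro acc a ha
  apply pvFoldlId; intro acc b hb
  apply pvFoldlId; intro acc c hc
  apply pvFoldlId; intro acc d hd
  apply pvFoldlId; intro acc e he
  apply pvFoldlId; intro acc f hf
  rw [if_neg]
  have := pvMem01 ha; have := pvMem01 hb; have := pvMem01 hc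
  have := pvMem01 hd; have := pvMem01 he; have := pvMem01 hf
  omega

-- B's hour filter is empty when num < 0 or num > 3 (popcount of 0..11 lies in 0..3)
theorem pvHourFilterEmpty (num : Int) (h : num < 0 ∨ 3 < num) :
    ((PySem.List.pyRange 0 12 1).filter
      (fun x => (PySem.Int.bitCount x : Int) == num)).map PySem.Int.toStr = [] := by
  rw [List.map_eq_nil_iff, List.filter_eq_nil_iff]
  intro x hx
  have hall : (PySem.List.pyRange 0 12 1).all
      (fun x => decide (PySem.Int.bitCount x ≤ 3)) = true := by decide
  rw [List.all_eq_true] at hall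
  have hb := of_decide_eq_true (hall x hx)
  intro hc
  rw [beq_iff_eq] at hc
  omega

-- B's minute filter is empty when num < 0 or num > 5 (popcount of 0..59 lies in 0..5)
theorem pvMinFilterEmpty (num : Int) (h : num < 0 ∨ 5 < num) :
    ((PySem.List.pyRange 0 60 1).filter
      (fun x => (PySem.Int.bitCount x : Int) == num)).map PySem.Int.toStr = [] := by
  rw [List.map_eq_nil_iff, List.filter_eq_nil_iff]
  intro x hx
  have hall : (PySem.List.pyRange 0 60 1).all
      (fun x => decide (PySem.Int.bitCount x ≤ 5)) = true := by decide
  rw [List.all_eq_true] at hall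
  have hb := of_decide_eq_true (hall x hx)
  intro hc
  rw [beq_iff_eq] at hc
  omega

theorem pvEq_h (num : Int) : getCombination num "h" = getCombination_alt num "h" := by
  unfold getCombination getCombination_alt
  rw [if_pos (show (("h" : String) == "h") = true by decide),
    if_pos (show (("h" : String) == "h") = true by decide)]
  by_cases hlo : 0 ≤ num
  · by_cases hhi : num ≤ 3
    · interval_cases num <;> decide
    · rw [if_neg (by omega), pvHourFilterEmpty num (Or.inr (by omega))]
  · rw [if_pos (by omega), pvHourLoopEmpty num (by omega),
      pvHourFilterEmpty num (Or.inl (by omega))]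

theorem pvEq_m (num : Int) : getCombination num "m" = getCombination_alt num "m" := by
  unfold getCombination getCombination_alt
  rw [if_neg (show ¬(("m" : String) == "h") = true by decide),
    if_neg (show ¬(("m" : String) == "h") = true by decide),
    if_pos (show (("m" : String) == "m") = true by decide),
    if_pos (show (("m" : String) == "m") = true by decide)]
  by_cases hlo : 0 ≤ num
  · by_cases hhi : num ≤ 5
    · interval_cases num <;> decide
    · rw [if_neg (by omega), pvMinFilterEmpty num (Or.inr (by omega))]
  · rw [if_pos (by omega), pvMinLoopEmpty num (by omega),
      pvMinFilterEmpty num (Or.inl (by omega))]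

-- ===== VERDICT (by name: the statement is the Claim_ definition above) =====
theorem getCombination_spec : Claim_equal_getCombination := by
  intro num keyword _
  unfold Spec_getCombination
  by_cases hh : keyword = "h"
  · rw [hh]; exact pvEq_h num
  · by_cases hm : keyword = "m"
    · rw [hm]; exact pvEq_m num
    · simp [getCombination, getCombination_alt, hh, hm]
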